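-- pv_equiv track=rewrite | github.com/mpettersson/PythonReview | questions/list/num_geometric_progression_k_tuples.py | num_geometric_progression_k_tuples_alt
-- ===== SOURCE A (Python) =====
-- from collections import defaultdict
--
-- def num_geometric_progression_k_tuples_alt(l, r, k=3):
--     if isinstance(l, list) and isinstance(r, int) and isinstance(k, int) and 0 <= k:
--         if k == 0:
--             return 0
--         if k == 1:
--             return len(l)
--         ratio_dicts = [defaultdict(int) for _ in range(k-1)]    # NOTE: THIS IS REVERSED: idx 0 is k-1th term count, idx
--         result = 0                                              # 1 is k-2th term count, ... last idx is 1st term count.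
--         for v in reversed(l):                                   # NOTE: This is also reversed because we DON'T store the
--             result += ratio_dicts[0][v*r]                       # Add the last terms count to the results.
--             for i in range(k-2):                                # NOTE: ratio_dicts IS reversed, so this ISN't REVERSED.
--                 ratio_dicts[i][v] += ratio_dicts[i+1][v*r]
--             ratio_dicts[-1][v] += 1                             # Update the first term count.
--         return result
-- ===== SOURCE B (Python) =====
-- def _count_ext(xs, r, need, m):
--     # ways to pick m further terms from xs, in order, the next one having to
--     # equal `need` and each subsequent one r times its predecessor
--     if m == 0:
--         return 1
--     total = 0
--     for i in range(len(xs)):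
--         if xs[i] == need:
--             total += _count_ext(xs[i + 1:], r, need * r, m - 1)
--     return total
--
-- def num_geometric_progression_k_tuples_alt(l, r, k=3):
--     if isinstance(l, list) and isinstance(r, int) and isinstance(k, int) and 0 <= k:
--         if k == 0:
--             return 0
--         if k == 1:
--             return len(l)
--         total = 0
--         for i in range(len(l)):
--             total += _count_ext(l[i + 1:], r, l[i] * r, k - 1)
--         return total
-- ===== Notes on version B (the rewrite author's own statement) =====
-- stated objective: alternative
-- what changed: A makes one backward pass keeping k-1 count dictionaries (a DP); B does a brute-force backtracking enumeration: for each start position it recursively searches the suffix for elements extending the progression, keeping no counting tables at all.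
-- outside the precondition, e.g. on num_geometric_progression_k_tuples_alt([1, 2], 2, -1): A returns None, B returns None
import Mathlib
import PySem

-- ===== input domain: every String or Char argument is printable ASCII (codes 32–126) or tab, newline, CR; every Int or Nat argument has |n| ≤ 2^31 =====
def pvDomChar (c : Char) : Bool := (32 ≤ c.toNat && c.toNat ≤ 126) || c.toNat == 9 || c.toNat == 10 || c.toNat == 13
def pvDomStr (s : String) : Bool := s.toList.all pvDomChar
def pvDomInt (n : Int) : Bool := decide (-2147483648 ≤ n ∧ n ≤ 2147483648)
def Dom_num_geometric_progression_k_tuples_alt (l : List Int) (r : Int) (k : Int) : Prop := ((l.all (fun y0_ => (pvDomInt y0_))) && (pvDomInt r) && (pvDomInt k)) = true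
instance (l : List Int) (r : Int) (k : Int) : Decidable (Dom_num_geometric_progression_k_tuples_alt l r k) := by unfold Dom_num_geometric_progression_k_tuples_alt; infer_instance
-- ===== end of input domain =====

-- B replaces A's backward DP pass over k-1 count dictionaries by a brute-force backtracking
-- enumeration (for each start, recursively search the suffix for extending elements); same value,
-- no counting tables (objective: alternative).

-- ===== PORT A =====
-- inner loop body: `ratio_dicts[i][v] += ratio_dicts[i+1][v*r]` (indices are in range: 0 ≤ i < k-2 < len)
def pvGPInnerStepA (v r : Int) (ds : Array (PySem.Dict Int Int)) (i : Int) : Array (PySem.Dict Int Int) :=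
  ds.setIfInBounds i.toNat ((ds.getD i.toNat PySem.Dict.empty).insert v
    ((ds.getD i.toNat PySem.Dict.empty).getD v 0 +
     (ds.getD (i.toNat + 1) PySem.Dict.empty).getD (v * r) 0))

-- `ratio_dicts[-1][v] += 1` (Python index -1 is the last slot, length k-1 ≥ 1)
def pvGPLastA (v : Int) (ds : Array (PySem.Dict Int Int)) : Array (PySem.Dict Int Int) :=
  ds.setIfInBounds (ds.size - 1) ((ds.getD (ds.size - 1) PySem.Dict.empty).insert v
    ((ds.getD (ds.size - 1) PySem.Dict.empty).getD v 0 + 1))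

-- one iteration of `for v in reversed(l)` (defaultdict reads are getD · 0)
def pvGPStepA (r k : Int) (st : Array (PySem.Dict Int Int) × Int) (v : Int) :
    Array (PySem.Dict Int Int) × Int :=
  (pvGPLastA v ((PySem.List.pyRange 0 (k - 2) 1).foldl (pvGPInnerStepA v r) st.1),
   st.2 + (st.1.getD 0 PySem.Dict.empty).getD (v * r) 0)

def num_geometric_progression_k_tuples_alt (l : List Int) (r : Int) (k : Int) : Int :=
  if 0 ≤ k then
    if k = 0 then 0
    else if k = 1 then (l.length : Int)
    else (l.reverse.foldl (pvGPStepA r k) (Array.replicate (k - 1).toNat PySem.Dict.empty, 0)).2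
  else 0  -- Python A falls through its guard and returns None here; excluded by Pre_

-- ===== PORT B =====
-- `_count_ext(xs, r, need, m)`: Python recurses on m-1 from m = k-1 ≥ 1, so m is always a
-- nonnegative int; the Nat parameter is exact for every reachable call. `xs[i]` with
-- i ∈ range(len(xs)) is always in range, so pyGetD's default is never read.
def pvCountExt (r : Int) : Nat → List Int → Int → Int
  | 0, _, _ => 1
  | m + 1, xs, need =>
      (PySem.List.pyRange 0 (xs.length : Int) 1).foldl
        (fun total i =>
          if PySem.List.pyGetD xs i 0 = need then
            total + pvCountExt r m (PySem.List.slice xs (some (i + 1)) none) (need * r)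
          else total) 0

def num_geometric_progression_k_tuples_alt_alt (l : List Int) (r : Int) (k : Int) : Int :=
  if 0 ≤ k then
    if k = 0 then 0
    else if k = 1 then (l.length : Int)
    else
      -- `for i in range(len(l)): total += _count_ext(l[i+1:], r, l[i]*r, k-1)`; here k ≥ 2,
      -- so (k-1).toNat is Python's k-1
      (PySem.List.pyRange 0 (l.length : Int) 1).foldl
        (fun total i =>
          total + pvCountExt r (k - 1).toNat (PySem.List.slice l (some (i + 1)) none)
            (PySem.List.pyGetD l i 0 * r)) 0
  else 0  -- Python B falls through its guard and returns None here; excluded by Pre_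

-- ===== PRECONDITION & SPEC =====
-- Pre_ excludes k < 0, where both Pythons fall through their isinstance/0<=k guard and return None (not an int).
def Pre_num_geometric_progression_k_tuples_alt (l : List Int) (r : Int) (k : Int) : Prop := 0 ≤ k
instance (l : List Int) (r : Int) (k : Int) : Decidable (Pre_num_geometric_progression_k_tuples_alt l r k) := by unfold Pre_num_geometric_progression_k_tuples_alt; infer_instance

def pvWitness_num_geometric_progression_k_tuples_alt : List Int × Int × Int := ([1, 2, 4, 2, 4, 8], 2, 3)

def Spec_num_geometric_progression_k_tuples_alt (l : List Int) (r : Int) (k : Int) (out : Int) : Prop := out = num_geometric_progression_k_tuples_alt_alt l r k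
instance (l : List Int) (r : Int) (k : Int) (out : Int) : Decidable (Spec_num_geometric_progression_k_tuples_alt l r k out) := by unfold Spec_num_geometric_progression_k_tuples_alt; infer_instance

-- ===== CLAIM (what is proved, stated in full; the proofs are below) =====
def Claim_equal_num_geometric_progression_k_tuples_alt : Prop := ∀ (l : List Int) (r : Int) (k : Int), Dom_num_geometric_progression_k_tuples_alt l r k → Pre_num_geometric_progression_k_tuples_alt l r k → Spec_num_geometric_progression_k_tuples_alt l r k (num_geometric_progression_k_tuples_alt l r k)

-- ===== LEMMAS AND PROOFS =====

-- Common reference counts of geometric-progression subsequences (ratio r), all Int-valued.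
-- pvC r j x s : chains of length j in s with first element = x
def pvC (r : Int) : Nat → Int → List Int → Int
  | _, _, [] => 0
  | j, x, v :: s =>
    pvC r j x s + (if v = x then
      (if j = 0 then 0 else if j = 1 then 1 else pvC r (j - 1) (v * r) s) else 0)

-- pvT r kk s : chains of length kk in s
def pvT (r : Int) : Nat → List Int → Int
  | _, [] => 0
  | kk, v :: s =>
    pvT r kk s + (if kk = 0 then 0 else if kk = 1 then 1 else pvC r (kk - 1) (v * r) s)

-- Array.getD after Array.setIfInBounds, in-range
lemma pvAGetD_set {α : Type} (ds : Array α) (i j : Nat) (a dflt : α) (hi : i < ds.size) :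
    (ds.setIfInBounds i a).getD j dflt = if j = i then a else ds.getD j dflt := by
  simp only [Array.getD_eq_getD_getElem?, Array.getElem?_setIfInBounds]
  rcases eq_or_ne j i with rfl | h
  · simp [hi]
  · rw [if_neg (Ne.symm h), if_neg h]

lemma pvAGetD_replicate {α : Type} (n j : Nat) (a dflt : α) :
    (Array.replicate n a).getD j dflt = if j < n then a else dflt := by
  simp only [Array.getD_eq_getD_getElem?, Array.getElem?_replicate]
  split_ifs <;> rfl

lemma pvC_cons_one (r x v : Int) (s : List Int) :
    pvC r 1 x (v :: s) = pvC r 1 x s + (if v = x then 1 else 0) := by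
  simp only [pvC]
  norm_num

lemma pvC_cons_ge2 (r x v : Int) (s : List Int) (j : Nat) (hj : 2 ≤ j) :
    pvC r j x (v :: s) = pvC r j x s + (if v = x then pvC r (j - 1) (v * r) s else 0) := by
  simp only [pvC, if_neg (show ¬ j = 0 by omega), if_neg (show ¬ j = 1 by omega)]

lemma pvT_cons_ge2 (r v : Int) (s : List Int) (kk : Nat) (hk : 2 ≤ kk) :
    pvT r kk (v :: s) = pvT r kk s + pvC r (kk - 1) (v * r) s := by
  simp only [pvT, if_neg (show ¬ kk = 0 by omega), if_neg (show ¬ kk = 1 by omega)]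

-- ===== A-side invariant =====

-- the inner `for i in range(k-2)` loop, characterised slot-wise
lemma pvInnerA (v r : Int) (m : Nat) : ∀ (t : Int) (ds : Array (PySem.Dict Int Int)),
    0 ≤ t → t.toNat + m ≤ ds.size →
    ((PySem.List.pyRange t (t + m) 1).foldl (pvGPInnerStepA v r) ds).size = ds.size ∧
    ∀ j : Nat, ((PySem.List.pyRange t (t + m) 1).foldl (pvGPInnerStepA v r) ds).getD j PySem.Dict.empty =
      if t.toNat ≤ j ∧ j < t.toNat + m then
        (ds.getD j PySem.Dict.empty).insert v
          ((ds.getD j PySem.Dict.empty).getD v 0 +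
           (ds.getD (j + 1) PySem.Dict.empty).getD (v * r) 0)
      else ds.getD j PySem.Dict.empty := by
  induction m with
  | zero =>
      intro t ds ht hlen
      rw [PySem.List.pyRange_one_eq_nil (by omega)]
      constructor
      · rfl
      · intro j; rw [if_neg (by omega)]; rfl
  | succ m ih =>
      intro t ds ht hlen
      have hcons : PySem.List.pyRange t (t + (m + 1 : Nat)) 1 = t :: PySem.List.pyRange (t + 1) (t + (m + 1 : Nat)) 1 :=
        PySem.List.pyRange_one_cons (by push_cast; omega)
      have harg : t + ((m + 1 : Nat) : Int) = (t + 1) + (m : Int) := by push_cast; ring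
      have htlt : t.toNat < ds.size := by omega
      have hset : (pvGPInnerStepA v r ds t).size = ds.size := by
        simp [pvGPInnerStepA]
      have hbound : (t + 1).toNat + m ≤ (pvGPInnerStepA v r ds t).size := by
        rw [hset]; omega
      obtain ⟨ihlen, ihget⟩ := ih (t + 1) (pvGPInnerStepA v r ds t) (by omega) hbound
      rw [hcons, List.foldl_cons, harg]
      refine ⟨by rw [ihlen, hset], ?_⟩
      intro j
      rw [ihget j]
      have ht1 : (t + 1).toNat = t.toNat + 1 := by omega
      by_cases h1 : (t + 1).toNat ≤ j ∧ j < (t + 1).toNat + m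
      · rw [if_pos h1, if_pos (by omega)]
        have hj : j ≠ t.toNat := by omega
        have hj1 : j + 1 ≠ t.toNat := by omega
        simp only [pvGPInnerStepA, pvAGetD_set ds t.toNat j _ _ htlt,
          pvAGetD_set ds t.toNat (j + 1) _ _ htlt, if_neg hj, if_neg hj1]
      · rw [if_neg h1]
        by_cases h2 : j = t.toNat
        · subst h2
          rw [if_pos (by omega)]
          simp only [pvGPInnerStepA]
          rw [pvAGetD_set ds t.toNat t.toNat _ _ htlt, if_pos rfl]
        · rw [if_neg (by omega)]
          simp only [pvGPInnerStepA, pvAGetD_set ds t.toNat j _ _ htlt, if_neg h2]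

lemma pvStepA_inv (r k : Int) (hk : 2 ≤ k) (s : List Int) (ds : Array (PySem.Dict Int Int))
    (res : Int) (v : Int)
    (hlen : ds.size = (k - 1).toNat)
    (hds : ∀ (i : Nat) (x : Int), i < (k - 1).toNat →
      (ds.getD i PySem.Dict.empty).getD x 0 = pvC r ((k - 1).toNat - i) x s)
    (hres : res = pvT r k.toNat s) :
    (pvGPStepA r k (ds, res) v).1.size = (k - 1).toNat ∧
    (∀ (i : Nat) (x : Int), i < (k - 1).toNat →
      ((pvGPStepA r k (ds, res) v).1.getD i PySem.Dict.empty).getD x 0 = pvC r ((k - 1).toNat - i) x (v :: s)) ∧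
    (pvGPStepA r k (ds, res) v).2 = pvT r k.toNat (v :: s) := by
  have hm : (k - 2 : Int) = 0 + (((k - 2).toNat : Nat) : Int) := by omega
  have hb : (0 : Int).toNat + (k - 2).toNat ≤ ds.size := by omega
  obtain ⟨hFlen, hFget⟩ := pvInnerA v r (k - 2).toNat 0 ds le_rfl hb
  rw [← hm] at hFlen hFget
  simp only [pvGPStepA]
  set F := (PySem.List.pyRange 0 (k - 2) 1).foldl (pvGPInnerStepA v r) ds with hF
  have hFlen' : F.size = (k - 1).toNat := by rw [hFlen, hlen]
  have hFlast : F.size - 1 = (k - 2).toNat := by omega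
  have hlast_lt : F.size - 1 < F.size := by omega
  refine ⟨?_, ?_, ?_⟩
  · simp only [pvGPLastA]
    rw [Array.size_setIfInBounds, hFlen']
  · intro i x hi
    simp only [pvGPLastA]
    rw [pvAGetD_set F (F.size - 1) i _ _ hlast_lt]
    by_cases hi2 : i = F.size - 1
    · rw [if_pos hi2, hi2, hFlast]
      have hcond : ¬ ((0 : Int).toNat ≤ (k - 2).toNat ∧ (k - 2).toNat < (0 : Int).toNat + (k - 2).toNat) := by
        omega
      rw [hFget ((k - 2).toNat), if_neg hcond]
      have h1 : (k - 1).toNat - (k - 2).toNat = 1 := by omega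
      rw [h1, PySem.Dict.getD_insert, pvC_cons_one]
      by_cases hxv : x = v
      · rw [if_pos hxv, if_pos hxv.symm, hxv, hds ((k - 2).toNat) v (by omega), h1]
      · rw [if_neg hxv, if_neg (fun h => hxv h.symm), hds ((k - 2).toNat) x (by omega), h1, add_zero]
    · rw [if_neg hi2]
      have hilt : i < (k - 2).toNat := by omega
      rw [hFget i, if_pos (by omega)]
      rw [PySem.Dict.getD_insert]
      rw [pvC_cons_ge2 r x v s ((k - 1).toNat - i) (by omega)]
      by_cases hxv : x = v
      · rw [if_pos hxv, if_pos hxv.symm, hxv, hds i v hi, hds (i + 1) (v * r) (by omega)]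
        have hKi : (k - 1).toNat - (i + 1) = (k - 1).toNat - i - 1 := by omega
        rw [hKi]
      · rw [if_neg hxv, if_neg (fun h => hxv h.symm), hds i x hi, add_zero]
  · show res + (ds.getD 0 PySem.Dict.empty).getD (v * r) 0 = _
    rw [hres, hds 0 (v * r) (by omega)]
    rw [pvT_cons_ge2 r v s k.toNat (by omega)]
    have hK0 : (k - 1).toNat - 0 = k.toNat - 1 := by omega
    rw [hK0]

lemma pvFoldA (r k : Int) (hk : 2 ≤ k) :
    ∀ (u s : List Int) (ds : Array (PySem.Dict Int Int)) (res : Int),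
    ds.size = (k - 1).toNat →
    (∀ (i : Nat) (x : Int), i < (k - 1).toNat →
      (ds.getD i PySem.Dict.empty).getD x 0 = pvC r ((k - 1).toNat - i) x s) →
    res = pvT r k.toNat s →
    (u.foldl (pvGPStepA r k) (ds, res)).2 = pvT r k.toNat (u.reverse ++ s) := by
  intro u
  induction u with
  | nil => intro s ds res _ _ hres; simpa using hres
  | cons v u ih =>
      intro s ds res hlen hds hres
      obtain ⟨h1, h2, h3⟩ := pvStepA_inv r k hk s ds res v hlen hds hres
      rw [List.foldl_cons]
      have := ih (v :: s) (pvGPStepA r k (ds, res) v).1 (pvGPStepA r k (ds, res) v).2 h1 h2 h3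
      rw [Prod.mk.eta] at this
      rw [this]
      simp [List.append_assoc]

lemma pvA_eq (l : List Int) (r k : Int) (hk : 2 ≤ k) :
    num_geometric_progression_k_tuples_alt l r k = pvT r k.toNat l := by
  unfold num_geometric_progression_k_tuples_alt
  rw [if_pos (by omega : (0:Int) ≤ k), if_neg (by omega : ¬ k = 0), if_neg (by omega : ¬ k = 1)]
  have := pvFoldA r k hk l.reverse [] (Array.replicate (k - 1).toNat PySem.Dict.empty) 0
    (by simp)
    (by intro i x hi
        rw [pvAGetD_replicate, if_pos hi]
        simp [pvC, PySem.Dict.getD_empty])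
    (by simp [pvT])
  rw [this]
  simp

-- ===== B-side: the backtracking count equals the reference chain counts =====

-- the index fold of pvCountExt, as a sum over Nat indices
lemma pvExt_sum (r need : Int) (m : Nat) (xs : List Int) :
    pvCountExt r (m + 1) xs need =
      ((List.range xs.length).map
        (fun j => if xs.getD j 0 = need then pvCountExt r m (xs.drop (j + 1)) (need * r) else 0)).sum := by
  show (PySem.List.pyRange 0 (xs.length : Int) 1).foldl _ 0 = _
  have hbody : (fun (total : Int) (i : Int) =>
      if PySem.List.pyGetD xs i 0 = need then
        total + pvCountExt r m (PySem.List.slice xs (some (i + 1)) none) (need * r)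
      else total) =
      (fun (total : Int) (i : Int) =>
        total + (if PySem.List.pyGetD xs i 0 = need then
          pvCountExt r m (PySem.List.slice xs (some (i + 1)) none) (need * r) else 0)) := by
    funext total i
    split_ifs <;> ring
  rw [hbody, PySem.List.foldl_add, zero_add, PySem.List.pyRange_one, List.map_map]
  congr 1
  apply List.map_congr_left
  intro j hj
  simp only [Function.comp, zero_add, Int.sub_zero, Int.toNat_natCast] at *
  have h1 : ((j : Int) + 1) = ((j + 1 : Nat) : Int) := by push_cast; ring
  rw [h1, PySem.List.slice_from_natCast, PySem.List.pyGetD_natCast]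

lemma pvExt_cons (r need x : Int) (m : Nat) (t : List Int) :
    pvCountExt r (m + 1) (x :: t) need =
      (if x = need then pvCountExt r m t (need * r) else 0) + pvCountExt r (m + 1) t need := by
  rw [pvExt_sum, pvExt_sum, List.length_cons, List.range_succ_eq_map, List.map_cons,
    List.map_map, List.sum_cons]
  have hrest : (List.map ((fun j => if (x :: t).getD j 0 = need then
        pvCountExt r m ((x :: t).drop (j + 1)) (need * r) else 0) ∘ (· + 1)) (List.range t.length)).sum =
      (List.map (fun j => if t.getD j 0 = need then
        pvCountExt r m (t.drop (j + 1)) (need * r) else 0) (List.range t.length)).sum :=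
    congrArg List.sum (List.map_congr_left (fun j hj => by simp [Function.comp]))
  rw [hrest]
  simp only [List.getD_cons_zero, List.drop_succ_cons, List.drop_zero]

lemma pvExt_eq_pvC (r : Int) : ∀ (xs : List Int) (m : Nat) (need : Int),
    pvCountExt r (m + 1) xs need = pvC r (m + 1) need xs := by
  intro xs
  induction xs with
  | nil =>
      intro m need
      rw [pvExt_sum]
      simp [pvC]
  | cons x t ih =>
      intro m need
      rw [pvExt_cons]
      rcases m with _ | m
      · rw [pvC_cons_one, ih 0 need]
        have h0 : pvCountExt r 0 t (need * r) = 1 := rfl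
        rw [h0]
        by_cases hx : x = need
        · subst hx
          rw [if_pos rfl]
          show 1 + pvC r 1 x t = pvC r 1 x t + 1
          ring
        · rw [if_neg hx]
          show 0 + pvC r 1 need t = pvC r 1 need t + 0
          ring
      · rw [pvC_cons_ge2 r need x t (m + 1 + 1) (by omega), ih (m + 1) need]
        simp only [Nat.add_sub_cancel]
        by_cases hx : x = need
        · subst hx
          rw [if_pos rfl, ih m (x * r)]
          simp [add_comm]
        · rw [if_neg hx]
          simp [hx]

lemma pvB_sum (r : Int) (m : Nat) : ∀ (xs : List Int),
    ((List.range xs.length).map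
      (fun j => pvCountExt r (m + 1) (xs.drop (j + 1)) (xs.getD j 0 * r))).sum =
    pvT r (m + 2) xs := by
  intro xs
  induction xs with
  | nil => simp [pvT]
  | cons x t ih =>
      rw [List.length_cons, List.range_succ_eq_map, List.map_cons, List.map_map, List.sum_cons]
      have hrest : (List.map ((fun j => pvCountExt r (m + 1) ((x :: t).drop (j + 1))
            ((x :: t).getD j 0 * r)) ∘ (· + 1)) (List.range t.length)).sum =
          (List.map (fun j => pvCountExt r (m + 1) (t.drop (j + 1)) (t.getD j 0 * r))
            (List.range t.length)).sum :=
        congrArg List.sum (List.map_congr_left (fun j hj => by simp [Function.comp]))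
      rw [hrest, ih, pvT_cons_ge2 r x t (m + 2) (by omega)]
      simp only [List.getD_cons_zero, List.drop_succ_cons, List.drop_zero]
      rw [pvExt_eq_pvC]
      have h21 : m + 2 - 1 = m + 1 := by omega
      rw [h21]
      ring

lemma pvB_eq (l : List Int) (r k : Int) (hk : 2 ≤ k) :
    num_geometric_progression_k_tuples_alt_alt l r k = pvT r k.toNat l := by
  unfold num_geometric_progression_k_tuples_alt_alt
  rw [if_pos (by omega : (0:Int) ≤ k), if_neg (by omega : ¬ k = 0), if_neg (by omega : ¬ k = 1)]
  rw [PySem.List.foldl_add, zero_add, PySem.List.pyRange_one, List.map_map]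
  have hm : (k - 1).toNat = (k - 2).toNat + 1 := by omega
  have hk2 : k.toNat = (k - 2).toNat + 2 := by omega
  rw [hk2, ← pvB_sum r ((k - 2).toNat) l]
  congr 1
  apply List.map_congr_left
  intro j hj
  simp only [Function.comp, zero_add, Int.sub_zero, Int.toNat_natCast]
  have h1 : ((j : Int) + 1) = ((j + 1 : Nat) : Int) := by push_cast; ring
  rw [h1, PySem.List.slice_from_natCast, PySem.List.pyGetD_natCast, hm]

-- ===== VERDICT (by name: the statement is the Claim_ definition above) =====
theorem num_geometric_progression_k_tuples_alt_spec : Claim_equal_num_geometric_progression_k_tuples_alt := by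
  intro l r k _ hpre
  unfold Spec_num_geometric_progression_k_tuples_alt
  have hk0 : (0 : Int) ≤ k := hpre
  by_cases h0 : k = 0
  · subst h0
    simp [num_geometric_progression_k_tuples_alt, num_geometric_progression_k_tuples_alt_alt]
  · by_cases h1 : k = 1
    · subst h1
      simp [num_geometric_progression_k_tuples_alt, num_geometric_progression_k_tuples_alt_alt]
    · have hk : 2 ≤ k := by omega
      rw [pvA_eq l r k hk, pvB_eq l r k hk]
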